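-- pv_equiv track=rewrite | github.com/yule-studio/yule-studio-agent | src/yule_orchestrator/planning/briefings.py | normalize_paragraph_spacing
-- ===== SOURCE A (Python) =====
-- def normalize_paragraph_spacing(text: str) -> str:
--     if not text:
--         return text
--     lines = [line.rstrip() for line in text.replace("\r\n", "\n").strip().split("\n")]
--     spaced: list[str] = []
--     for line in lines:
--         if (
--             line.strip()
--             and spaced
--             and spaced[-1].strip()
--             and not _is_list_or_heading(spaced[-1])
--             and not _is_list_or_heading(line)
--         ):
--             spaced.append("")
--         spaced.append(line)
--
--     collapsed: list[str] = []
--     previous_blank = False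
--     for line in spaced:
--         is_blank = not line.strip()
--         if is_blank and previous_blank:
--             continue
--         collapsed.append(line)
--         previous_blank = is_blank
--     return "\n".join(collapsed).strip()
--
-- def _is_list_or_heading(line: str) -> bool:
--     stripped = line.strip()
--     if not stripped:
--         return False
--     if stripped[0] in "-*•":
--         return True
--     head = stripped.split(maxsplit=1)[0]
--     if len(head) >= 2 and head[:-1].isdigit() and head[-1] in ".)":
--         return True
--     if stripped.endswith(":"):
--         return True
--     return False
-- ===== SOURCE B (Python) =====
-- def _is_list_or_heading(line: str) -> bool:
--     stripped = line.strip()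
--     if not stripped:
--         return False
--     if stripped[0] in "-*•":
--         return True
--     head = stripped.split(maxsplit=1)[0]
--     if len(head) >= 2 and head[:-1].isdigit() and head[-1] in ".)":
--         return True
--     if stripped.endswith(":"):
--         return True
--     return False
--
--
-- def normalize_paragraph_spacing(text: str) -> str:
--     if not text:
--         return text
--     out: list[str] = []
--     prev_out_blank = False  # is the last line of out blank?
--     prev_src = None  # last source line seen
--     for raw in text.replace("\r\n", "\n").strip().split("\n"):
--         line = raw.rstrip()
--         if line.strip():
--             if (
--                 prev_src is not None
--                 and prev_src.strip()
--                 and not _is_list_or_heading(prev_src)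
--                 and not _is_list_or_heading(line)
--             ):
--                 out.append("")
--             out.append(line)
--             prev_out_blank = False
--         else:
--             if not prev_out_blank:
--                 out.append(line)
--             prev_out_blank = True
--         prev_src = line
--     return "\n".join(out).strip()
-- ===== Notes on version B (the rewrite author's own statement) =====
-- stated objective: alternative
-- what changed: A's two sequential passes (insert blank separators into a spaced list, then collapse blank runs) are fused into one loop over the raw lines that builds the output directly, tracking only the last source line and a previous-output-blank flag.
import Mathlib
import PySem

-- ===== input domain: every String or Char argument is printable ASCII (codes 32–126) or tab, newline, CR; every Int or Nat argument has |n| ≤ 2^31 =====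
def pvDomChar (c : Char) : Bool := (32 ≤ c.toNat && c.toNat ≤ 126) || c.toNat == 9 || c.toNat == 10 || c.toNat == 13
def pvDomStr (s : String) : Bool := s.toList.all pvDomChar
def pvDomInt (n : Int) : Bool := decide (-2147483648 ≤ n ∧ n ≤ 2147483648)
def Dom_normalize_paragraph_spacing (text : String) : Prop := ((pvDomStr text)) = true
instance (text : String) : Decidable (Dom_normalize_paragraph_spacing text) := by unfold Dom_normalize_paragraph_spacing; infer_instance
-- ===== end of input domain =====

-- B fuses A's two sequential passes (blank insertion, then blank collapsing) into one
-- loop over the raw lines that builds the output directly (objective: alternative).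


-- ===== PORT A =====
-- helper _is_list_or_heading, shared by both Pythons (identical code in Source A and Source B)
def pvIsListOrHeading (line : List Char) : Bool :=
  let stripped := PySem.Chars.strip line
  if stripped.isEmpty then false
  else if PySem.Chars.isIn [stripped.headD ' '] ['-', '*', '•'] then true
  else
    -- head = stripped.split(maxsplit=1)[0]; stripped is nonempty and free of surrounding
    -- whitespace here, so the split is nonempty and headD never takes its default
    let head := (PySem.Chars.split₀Max stripped 1).headD []
    if decide (2 ≤ head.length) && PySem.Chars.strIsdigit head.dropLast
        && PySem.Chars.isIn [head.getLastD ' '] ['.', ')'] then true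
    else if PySem.Chars.endswith stripped [':'] then true
    else false

-- text.replace("\r\n", "\n").strip().split("\n")  (shared preprocessing of both Pythons)
def pvSplitLines (text : String) : List (List Char) :=
  PySem.Chars.splitOn (PySem.Chars.strip (PySem.Chars.replace text.toList ['\r', '\n'] ['\n'])) ['\n']

-- body of A's first loop; spaced[-1] = getLastD [] (guarded by the non-emptiness test)
def pvStepSpace (spaced : List (List Char)) (line : List Char) : List (List Char) :=
  if !(PySem.Chars.strip line).isEmpty
      && !spaced.isEmpty
      && !(PySem.Chars.strip (spaced.getLastD [])).isEmpty
      && !pvIsListOrHeading (spaced.getLastD [])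
      && !pvIsListOrHeading line
  then spaced ++ [[], line]
  else spaced ++ [line]

-- body of A's second loop; state = (collapsed, previous_blank)
def pvStepCollapse (st : List (List Char) × Bool) (line : List Char) : List (List Char) × Bool :=
  let isBlank := (PySem.Chars.strip line).isEmpty
  if isBlank && st.2 then st else (st.1 ++ [line], isBlank)

def normalize_paragraph_spacing (text : String) : String :=
  if text.toList.isEmpty then text
  else
    let lines := (pvSplitLines text).map PySem.Chars.rstrip
    let spaced := lines.foldl pvStepSpace []
    let collapsed := (spaced.foldl pvStepCollapse ([], false)).1
    String.ofList (PySem.Chars.strip (PySem.Chars.join ['\n'] collapsed))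

-- ===== PORT B =====
-- body of B's single fused loop on the rstripped line; state = (out, prev_out_blank, prev_src)
def pvFusedCore (st : List (List Char) × Bool × Option (List Char)) (line : List Char) :
    List (List Char) × Bool × Option (List Char) :=
  if !(PySem.Chars.strip line).isEmpty then
    let ins := match st.2.2 with
      | none => false
      | some p => !(PySem.Chars.strip p).isEmpty && !pvIsListOrHeading p && !pvIsListOrHeading line
    ((if ins then st.1 ++ [[]] else st.1) ++ [line], false, some line)
  else
    ((if st.2.1 then st.1 else st.1 ++ [line]), true, some line)

-- B's loop body: line = raw.rstrip()
def pvStepFused (st : List (List Char) × Bool × Option (List Char)) (raw : List Char) :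
    List (List Char) × Bool × Option (List Char) :=
  pvFusedCore st (PySem.Chars.rstrip raw)

def normalize_paragraph_spacing_alt (text : String) : String :=
  if text.toList.isEmpty then text
  else
    let st := (pvSplitLines text).foldl pvStepFused ([], false, none)
    String.ofList (PySem.Chars.strip (PySem.Chars.join ['\n'] st.1))

-- ===== PRECONDITION & SPEC =====
def Spec_normalize_paragraph_spacing (text : String) (out : String) : Prop := out = normalize_paragraph_spacing_alt text
instance (text : String) (out : String) : Decidable (Spec_normalize_paragraph_spacing text out) := by unfold Spec_normalize_paragraph_spacing; infer_instance

-- ===== CLAIM (what is proved, stated in full; the proofs are below) =====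
def Claim_equal_normalize_paragraph_spacing : Prop := ∀ (text : String), Dom_normalize_paragraph_spacing text → Spec_normalize_paragraph_spacing text (normalize_paragraph_spacing text)

-- ===== LEMMAS AND PROOFS =====

-- Invariant tying A's two-pass state to B's fused state after the same prefix of lines:
-- collapsing the spaced prefix gives exactly B's (out, prev_out_blank), and prev_src is
-- the last line of the prefix (= last element of spaced), whose blankness is prev_out_blank.
def pvInv (spaced out : List (List Char)) (pb : Bool) (prev : Option (List Char)) : Prop :=
  spaced.foldl pvStepCollapse ([], false) = (out, pb) ∧
  (match prev with
   | none => spaced = []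
   | some p => spaced ≠ [] ∧ spaced.getLastD [] = p ∧ pb = (PySem.Chars.strip p).isEmpty)

lemma pvCollapse_append (sp : List (List Char)) (l : List Char) :
    (sp ++ [l]).foldl pvStepCollapse ([], false) =
      pvStepCollapse (sp.foldl pvStepCollapse ([], false)) l := by
  simp [List.foldl_append]

lemma pvStripNil : PySem.Chars.strip ([] : List Char) = [] := by decide

lemma pvStep_inv (spaced out : List (List Char)) (pb : Bool) (prev : Option (List Char))
    (line : List Char) (h : pvInv spaced out pb prev) :
    pvInv (pvStepSpace spaced line) (pvFusedCore (out, pb, prev) line).1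
      (pvFusedCore (out, pb, prev) line).2.1 (pvFusedCore (out, pb, prev) line).2.2 := by
  obtain ⟨hc, hp⟩ := h
  by_cases hb : (PySem.Chars.strip line).isEmpty
  · -- blank line: A appends it to spaced, collapse keeps it iff prev_out_blank is false
    have hA : pvStepSpace spaced line = spaced ++ [line] := by
      simp [pvStepSpace, hb]
    rw [hA]
    constructor
    · rw [pvCollapse_append, hc]
      cases pb <;> simp [pvFusedCore, pvStepCollapse, hb]
    · simp [pvFusedCore, hb]
  · -- non-blank line
    have hbe : (PySem.Chars.strip line).isEmpty = false := by simpa using hb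
    cases prev with
    | none =>
      have hsp : spaced = [] := hp
      subst hsp
      have hout : (([] : List (List Char)), false) = (out, pb) := by simpa using hc
      injection hout with ho hpb
      subst ho
      subst hpb
      have hA : pvStepSpace [] line = [line] := by simp [pvStepSpace]
      rw [hA]
      constructor
      · simp [pvFusedCore, pvStepCollapse, hbe]
      · simp [pvFusedCore, hbe]
    | some p =>
      obtain ⟨hne, hlast, hpb⟩ := hp
      simp only [List.getLastD_eq_getLast?] at hlast
      have hspe : spaced.isEmpty = false := by simp [hne]
      by_cases hps : (PySem.Chars.strip p).isEmpty
      · -- previous source line blank: neither program inserts a separator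
        have hA : pvStepSpace spaced line = spaced ++ [line] := by
          simp [pvStepSpace, hlast, hps]
        have hpbv : pb = true := by rw [hpb, hps]
        rw [hA]
        constructor
        · rw [pvCollapse_append, hc, hpbv]
          simp [pvFusedCore, pvStepCollapse, hbe, hps]
        · simp [pvFusedCore, hbe, hps]
      · have hpse : (PySem.Chars.strip p).isEmpty = false := by simpa using hps
        have hpbv : pb = false := by rw [hpb, hpse]
        by_cases h1 : pvIsListOrHeading p
        · -- previous line is a list/heading: no separator
          have hA : pvStepSpace spaced line = spaced ++ [line] := by
            simp [pvStepSpace, hlast, h1]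
          rw [hA]
          constructor
          · rw [pvCollapse_append, hc, hpbv]
            simp [pvFusedCore, pvStepCollapse, hbe, h1]
          · simp [pvFusedCore, hbe, h1]
        · have h1e : pvIsListOrHeading p = false := by simpa using h1
          by_cases h2 : pvIsListOrHeading line
          · -- current line is a list/heading: no separator
            have hA : pvStepSpace spaced line = spaced ++ [line] := by
              simp [pvStepSpace, hlast, h2]
            rw [hA]
            constructor
            · rw [pvCollapse_append, hc, hpbv]
              simp [pvFusedCore, pvStepCollapse, hbe, h2]
            · simp [pvFusedCore, hbe, h2]
          · -- two adjacent paragraph lines: a separator is inserted and survives collapsing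
            have h2e : pvIsListOrHeading line = false := by simpa using h2
            have hA : pvStepSpace spaced line = (spaced ++ [[]]) ++ [line] := by
              simp [pvStepSpace, hlast, hbe, hne, hpse, h1e, h2e]
            rw [hA]
            constructor
            · rw [pvCollapse_append, pvCollapse_append, hc, hpbv]
              simp [pvFusedCore, pvStepCollapse, hbe, hpse, h1e, h2e, pvStripNil]
            · simp [pvFusedCore, hbe, hpse, h1e, h2e]

lemma pvMain (ls : List (List Char)) (spaced out : List (List Char)) (pb : Bool)
    (prev : Option (List Char)) (h : pvInv spaced out pb prev) :
    pvInv (ls.foldl pvStepSpace spaced) (ls.foldl pvFusedCore (out, pb, prev)).1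
      (ls.foldl pvFusedCore (out, pb, prev)).2.1 (ls.foldl pvFusedCore (out, pb, prev)).2.2 := by
  induction ls generalizing spaced out pb prev with
  | nil => exact h
  | cons l t ih =>
    simpa using ih _ _ _ _ (pvStep_inv spaced out pb prev l h)

-- ===== VERDICT (by name: the statement is the Claim_ definition above) =====
theorem normalize_paragraph_spacing_spec : Claim_equal_normalize_paragraph_spacing := by
  intro text _
  unfold Spec_normalize_paragraph_spacing normalize_paragraph_spacing normalize_paragraph_spacing_alt
  by_cases he : text.toList.isEmpty
  · simp [he]
  · simp only [he, Bool.false_eq_true, if_false]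
    have h0 : pvInv [] [] false none := ⟨rfl, rfl⟩
    have hmain := pvMain ((pvSplitLines text).map PySem.Chars.rstrip) [] [] false none h0
    have hfold : (pvSplitLines text).foldl pvStepFused ([], false, none) =
        ((pvSplitLines text).map PySem.Chars.rstrip).foldl pvFusedCore ([], false, none) := by
      rw [List.foldl_map]
      rfl
    have h1 : ((((pvSplitLines text).map PySem.Chars.rstrip).foldl pvStepSpace []).foldl
          pvStepCollapse ([], false)).1
        = (((pvSplitLines text).map PySem.Chars.rstrip).foldl pvFusedCore ([], false, none)).1 := by
      simpa using congrArg Prod.fst hmain.1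
    rw [hfold, h1]
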